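-- pv_equiv track=rewrite | github.com/LautaroCenteno/int-prog | segundo bimestre/simulacto_t1.py | maxima_cantidad_primos
-- ===== SOURCE A (Python) =====
-- def es_primo(n: int) -> bool:
--     cant_div: int = 0
--     for i in range(1,n+1):
--         if n%i == 0:
--             cant_div += 1
--     if cant_div == 2:
--         return True
--     return False
--
-- def maxima_cantidad_primos( A: list[list[int]]) -> int:
--     res: int = 0
--     if len(A[0]) == 0:
--         return 0
--     for i in range(len(A[0])):
--         cant_actual: int = 0
--         for t in range(len(A)):
--             if es_primo(A[t][i]):
--                 cant_actual += 1
--         if cant_actual > res: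
--             res = cant_actual
--     return res
-- ===== SOURCE B (Python) =====
-- def es_primo(n: int) -> bool:
--     cant_div = 0
--     for i in range(1, n + 1):
--         if n % i == 0:
--             cant_div += 1
--     return cant_div == 2
--
--
-- def maxima_cantidad_primos(A: list[list[int]]) -> int:
--     ncols = len(A[0])
--     if ncols == 0:
--         return 0
--     counts = [0] * ncols
--     for row in A:
--         counts = [counts[i] + (1 if es_primo(row[i]) else 0) for i in range(ncols)]
--     return max(counts)
-- ===== Notes on version B (the rewrite author's own statement) =====
-- stated objective: alternative
-- what changed: A scans column-by-column keeping a running maximum; B makes one row-major pass building a per-column prime-count table and takes max of the table at the end.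
import Mathlib
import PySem

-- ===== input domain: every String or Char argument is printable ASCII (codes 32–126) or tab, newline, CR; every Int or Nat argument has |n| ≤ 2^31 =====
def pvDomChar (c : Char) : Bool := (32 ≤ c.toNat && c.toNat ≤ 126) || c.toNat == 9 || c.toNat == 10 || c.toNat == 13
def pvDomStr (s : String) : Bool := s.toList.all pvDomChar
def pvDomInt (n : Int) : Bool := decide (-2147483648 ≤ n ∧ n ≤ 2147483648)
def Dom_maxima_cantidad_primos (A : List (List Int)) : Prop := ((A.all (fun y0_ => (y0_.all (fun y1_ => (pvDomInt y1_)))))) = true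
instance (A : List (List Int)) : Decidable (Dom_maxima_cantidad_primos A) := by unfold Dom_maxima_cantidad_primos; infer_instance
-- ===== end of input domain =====

-- B replaces A's column-outer running-max double loop by a row-major per-column tally
-- (counts rebuilt per row) reduced with max at the end: a different decomposition of the
-- same computation (objective: alternative, same cost; es_primo unchanged).

-- ===== PORT A =====
def es_primo (n : Int) : Bool :=
  let cant_div : Int :=
    (PySem.List.pyRange 1 (n + 1) 1).foldl
      (fun c i => if PySem.Int.mod n i = 0 then c + 1 else c) 0
  if cant_div = 2 then true else false

def maxima_cantidad_primos (A : List (List Int)) : Int :=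
  if (PySem.List.pyGetD A 0 []).length = 0 then 0
  else
    (PySem.List.pyRange 0 ((PySem.List.pyGetD A 0 []).length : Int) 1).foldl
      (fun res i =>
        let cant_actual : Int :=
          (PySem.List.pyRange 0 (A.length : Int) 1).foldl
            (fun c t =>
              if es_primo (PySem.List.pyGetD (PySem.List.pyGetD A t []) i 0) then c + 1 else c) 0
        if cant_actual > res then cant_actual else res) 0

-- ===== PORT B =====
def es_primo_b (n : Int) : Bool :=
  let cant_div : Int :=
    (PySem.List.pyRange 1 (n + 1) 1).foldl
      (fun c i => if PySem.Int.mod n i = 0 then c + 1 else c) 0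
  cant_div == 2

def maxima_cantidad_primos_alt (A : List (List Int)) : Int :=
  let ncols := (PySem.List.pyGetD A 0 []).length
  if ncols = 0 then 0
  else
    let counts : List Int :=
      A.foldl
        (fun cs row =>
          (PySem.List.pyRange 0 (ncols : Int) 1).map
            (fun i =>
              PySem.List.pyGetD cs i 0 +
                (if es_primo_b (PySem.List.pyGetD row i 0) then 1 else 0)))
        (List.replicate ncols (0 : Int))
    (PySem.List.max? counts (fun y => y)).getD 0

-- ===== PRECONDITION & SPEC =====
-- Pre_ = exactly the inputs where Python A returns: A nonempty (A[0] raises IndexError on []),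
-- and every row at least as long as A[0] (otherwise A[t][i] raises IndexError).
def Pre_maxima_cantidad_primos (A : List (List Int)) : Prop :=
  A ≠ [] ∧ ∀ r ∈ A, (A.headD []).length ≤ r.length
instance (A : List (List Int)) : Decidable (Pre_maxima_cantidad_primos A) := by
  unfold Pre_maxima_cantidad_primos; infer_instance
def pvWitness_maxima_cantidad_primos : List (List Int) := [[2, 3, 4], [5, 6, 7]]

def Spec_maxima_cantidad_primos (A : List (List Int)) (out : Int) : Prop := out = maxima_cantidad_primos_alt A
instance (A : List (List Int)) (out : Int) : Decidable (Spec_maxima_cantidad_primos A out) := by unfold Spec_maxima_cantidad_primos; infer_instance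

-- ===== CLAIM (what is proved, stated in full; the proofs are below) =====
def Claim_equal_maxima_cantidad_primos : Prop := ∀ (A : List (List Int)), Dom_maxima_cantidad_primos A → Pre_maxima_cantidad_primos A → Spec_maxima_cantidad_primos A (maxima_cantidad_primos A)

-- ===== LEMMAS AND PROOFS =====

-- number of prime entries in column i (0/1-sum over the rows)
def colSum (A : List (List Int)) (i : Int) : Int :=
  (A.map (fun row => if es_primo (PySem.List.pyGetD row i 0) then (1 : Int) else 0)).sum

theorem es_primo_b_eq (n : Int) : es_primo_b n = es_primo n := by
  simp only [es_primo, es_primo_b]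
  rfl

theorem colSum_cons (r : List Int) (A : List (List Int)) (i : Int) :
    colSum (r :: A) i = (if es_primo (PySem.List.pyGetD r i 0) then (1 : Int) else 0) + colSum A i := by
  simp [colSum]

theorem colSum_nonneg (A : List (List Int)) (i : Int) : 0 ≤ colSum A i := by
  induction A with
  | nil => simp [colSum]
  | cons r A ih => rw [colSum_cons]; split_ifs <;> omega

theorem foldl_cnt (p : List Int → Bool) (A : List (List Int)) (c : Int) :
    A.foldl (fun c row => if p row then c + 1 else c) c
      = c + (A.map (fun row => if p row then (1 : Int) else 0)).sum := by
  induction A generalizing c with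
  | nil => simp
  | cons r A ih => simp only [List.foldl_cons, List.map_cons, List.sum_cons, ih]; split_ifs <;> ring

theorem inner_eq (A : List (List Int)) (i : Int) :
    (PySem.List.pyRange 0 (A.length : Int) 1).foldl
      (fun c t =>
        if es_primo (PySem.List.pyGetD (PySem.List.pyGetD A t []) i 0) then c + 1 else c) 0
      = colSum A i := by
  rw [PySem.List.foldl_pyRange_zero_pyGetD' A []
    (fun c row => if es_primo (PySem.List.pyGetD row i 0) then c + 1 else c) 0]
  rw [foldl_cnt (fun row => es_primo (PySem.List.pyGetD row i 0)) A 0]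
  simp [colSum]

theorem counts_inv (n : Nat) (A : List (List Int)) (g : Int → Int) :
    A.foldl
      (fun cs row =>
        (PySem.List.pyRange 0 (n : Int) 1).map
          (fun i =>
            PySem.List.pyGetD cs i 0 +
              (if es_primo_b (PySem.List.pyGetD row i 0) then 1 else 0)))
      ((PySem.List.pyRange 0 (n : Int) 1).map g)
      = (PySem.List.pyRange 0 (n : Int) 1).map (fun i => g i + colSum A i) := by
  induction A generalizing g with
  | nil => simp [colSum]
  | cons r A ih =>
    rw [List.foldl_cons]
    have hstep :
        (PySem.List.pyRange 0 (n : Int) 1).map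
          (fun i =>
            PySem.List.pyGetD ((PySem.List.pyRange 0 (n : Int) 1).map g) i 0 +
              (if es_primo_b (PySem.List.pyGetD r i 0) then 1 else 0))
          = (PySem.List.pyRange 0 (n : Int) 1).map
              (fun i => g i + (if es_primo_b (PySem.List.pyGetD r i 0) then 1 else 0)) := by
      apply List.map_congr_left
      intro i hi
      rw [PySem.List.mem_pyRange_one] at hi
      rw [PySem.List.pyGetD_map_pyRange_of_nonneg g (n : Int) i 0 hi.1 hi.2]
    rw [hstep, ih]
    apply List.map_congr_left
    intro i _
    rw [colSum_cons, es_primo_b_eq]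
    ring

theorem replicate_eq_map (n : Nat) :
    List.replicate n (0 : Int) = (PySem.List.pyRange 0 (n : Int) 1).map (fun _ => 0) := by
  rw [List.map_const']
  congr 1
  rw [PySem.List.length_pyRange_one]
  omega

theorem step_max (res c : Int) : (if c > res then c else res) = max res c := by
  simp only [max_def]; split_ifs <;> omega

theorem foldl_runmax (x : Int) (t : List Int) (hx : 0 ≤ x) :
    (x :: t).foldl (fun res c => if c > res then c else res) 0
      = (PySem.List.max? (x :: t) (fun y => y)).getD 0 := by
  rw [PySem.List.max?_id_cons]
  have hfun : (fun (res c : Int) => if c > res then c else res) = fun res c => max res c :=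
    funext fun res => funext fun c => step_max res c
  rw [hfun]
  simp only [List.foldl_cons, Option.getD_some]
  have : max 0 x = x := by omega
  rw [this]

-- ===== VERDICT (by name: the statement is the Claim_ definition above) =====
theorem maxima_cantidad_primos_spec : Claim_equal_maxima_cantidad_primos := by
  intro A _ _
  unfold Spec_maxima_cantidad_primos maxima_cantidad_primos maxima_cantidad_primos_alt
  set n := (PySem.List.pyGetD A 0 []).length with hn
  by_cases h0 : n = 0
  · simp [h0]
  · simp only [h0, if_false]
    -- A side: inner loop = colSum, then foldl over the mapped column counts
    have hA :
        (PySem.List.pyRange 0 (n : Int) 1).foldl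
          (fun res i =>
            let cant_actual : Int :=
              (PySem.List.pyRange 0 (A.length : Int) 1).foldl
                (fun c t =>
                  if es_primo (PySem.List.pyGetD (PySem.List.pyGetD A t []) i 0) then c + 1 else c) 0
            if cant_actual > res then cant_actual else res) 0
          = ((PySem.List.pyRange 0 (n : Int) 1).map (fun i => colSum A i)).foldl
              (fun res c => if c > res then c else res) 0 := by
      rw [List.foldl_map]
      have hfun :
          (fun (res i : Int) =>
            let cant_actual : Int :=
              (PySem.List.pyRange 0 (A.length : Int) 1).foldl
                (fun c t =>
                  if es_primo (PySem.List.pyGetD (PySem.List.pyGetD A t []) i 0) then c + 1 else c) 0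
            if cant_actual > res then cant_actual else res)
            = fun (res i : Int) => if colSum A i > res then colSum A i else res :=
        funext fun res => funext fun i => by simp only [inner_eq]
      rw [hfun]
    rw [hA]
    -- B side: counts = mapped column counts
    rw [replicate_eq_map n, counts_inv n A (fun _ => 0)]
    have hmap :
        (PySem.List.pyRange 0 (n : Int) 1).map (fun i => (0 : Int) + colSum A i)
          = (PySem.List.pyRange 0 (n : Int) 1).map (fun i => colSum A i) := by
      apply List.map_congr_left; intro i _; ring
    rw [hmap]
    -- the list is nonempty; its head is a nonnegative colSum
    have hlen : ((PySem.List.pyRange 0 (n : Int) 1).map (fun i => colSum A i)).length = n := by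
      rw [List.length_map, PySem.List.length_pyRange_one]; omega
    obtain ⟨x, t, hxt⟩ :=
      List.exists_cons_of_ne_nil (l := (PySem.List.pyRange 0 (n : Int) 1).map (fun i => colSum A i))
        (by intro hnil; rw [hnil] at hlen; simp at hlen; omega)
    rw [hxt]
    have hx : 0 ≤ x := by
      have : x ∈ (PySem.List.pyRange 0 (n : Int) 1).map (fun i => colSum A i) := by
        rw [hxt]; exact List.mem_cons_self
      obtain ⟨i, _, hi⟩ := List.mem_map.mp this
      rw [← hi]; exact colSum_nonneg A i
    exact foldl_runmax x t hx
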